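-- pv_equiv track=rewrite | github.com/ENFStudios/mister-companion-macos | core/manuals.py | merge_pdfs
-- ===== SOURCE A (Python) =====
-- def merge_pdfs(remote_pdfs, cached_pdfs):
--     merged = []
--     seen = set()
--
--     for item in remote_pdfs + cached_pdfs:
--         key = item["name"].lower()
--
--         if key in seen:
--             continue
--
--         seen.add(key)
--         merged.append(item)
--
--     return sorted(merged, key=lambda item: item["name"].lower())
-- ===== SOURCE B (Python) =====
-- def merge_pdfs(remote_pdfs, cached_pdfs):
--     ordered = sorted(remote_pdfs + cached_pdfs, key=lambda item: item["name"].lower())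
--     merged = []
--     for item in ordered:
--         if not merged or merged[-1]["name"].lower() != item["name"].lower():
--             merged.append(item)
--     return merged
-- ===== Notes on version B (the rewrite author's own statement) =====
-- stated objective: alternative
-- what changed: B stably sorts the concatenated list by lowercased name first and then removes duplicates in one adjacent scan comparing each item to the last kept one, instead of A's seen-set dedup pass followed by a sort; sort stability guarantees the first original occurrence of each name survives, as in A.
import Mathlib
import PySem

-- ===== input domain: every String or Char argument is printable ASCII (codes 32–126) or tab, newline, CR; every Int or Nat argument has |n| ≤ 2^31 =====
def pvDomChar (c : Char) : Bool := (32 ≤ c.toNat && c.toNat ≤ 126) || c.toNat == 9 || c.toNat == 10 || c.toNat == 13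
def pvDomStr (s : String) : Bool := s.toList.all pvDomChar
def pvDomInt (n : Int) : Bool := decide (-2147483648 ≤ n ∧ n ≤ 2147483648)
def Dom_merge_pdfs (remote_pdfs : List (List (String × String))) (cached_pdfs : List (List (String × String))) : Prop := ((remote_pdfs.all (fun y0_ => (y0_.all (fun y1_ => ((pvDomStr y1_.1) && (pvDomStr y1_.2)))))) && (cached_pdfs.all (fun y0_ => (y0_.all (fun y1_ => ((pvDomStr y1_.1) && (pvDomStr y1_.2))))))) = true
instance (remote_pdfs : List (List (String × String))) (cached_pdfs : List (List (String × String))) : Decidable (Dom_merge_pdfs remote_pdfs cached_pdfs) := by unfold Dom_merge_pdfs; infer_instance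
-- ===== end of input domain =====

-- B replaces A's seen-set dedup pass followed by a sort with one stable sort followed by an
-- adjacent-duplicate scan (no auxiliary set); same result, different decomposition.

-- item["name"].lower() — the same expression occurs in both Pythons
def pvKey (item : List (String × String)) : String :=
  PySem.Str.lower ((PySem.Dict.get? (PySem.Dict.mk item) "name").getD "")

-- ===== PORT A =====
def merge_pdfs (remote_pdfs : List (List (String × String))) (cached_pdfs : List (List (String × String))) : List (List (String × String)) :=
  -- merged = []; seen = set(); for item in remote_pdfs + cached_pdfs: key = item["name"].lower(); …
  let st := (remote_pdfs ++ cached_pdfs).foldl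
    (fun (st : List (List (String × String)) × PySem.Set String) item =>
      if PySem.Set.contains st.2 (pvKey item) then st          -- if key in seen: continue
      else (st.1 ++ [item], PySem.Set.add st.2 (pvKey item)))  -- seen.add(key); merged.append(item)
    ([], PySem.Set.empty)
  PySem.List.sorted st.1 pvKey                                 -- sorted(merged, key=…)

-- ===== PORT B =====
def merge_pdfs_alt (remote_pdfs : List (List (String × String))) (cached_pdfs : List (List (String × String))) : List (List (String × String)) :=
  let ordered := PySem.List.sorted (remote_pdfs ++ cached_pdfs) pvKey   -- sorted(remote+cached, key=…)
  ordered.foldl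
    (fun merged item =>
      match merged.getLast? with                               -- if not merged
      | none => merged ++ [item]
      | some last =>                                           -- or merged[-1]["name"].lower() != key
        if pvKey last = pvKey item then merged else merged ++ [item])
    []

-- ===== PRECONDITION & SPEC =====
-- Pre_ excludes exactly the inputs where some dict lacks the "name" key: there Python A raises KeyError.
def Pre_merge_pdfs (remote_pdfs : List (List (String × String))) (cached_pdfs : List (List (String × String))) : Prop :=
  ∀ item ∈ remote_pdfs ++ cached_pdfs, (PySem.Dict.get? (PySem.Dict.mk item) "name").isSome = true
instance (remote_pdfs : List (List (String × String))) (cached_pdfs : List (List (String × String))) : Decidable (Pre_merge_pdfs remote_pdfs cached_pdfs) := by unfold Pre_merge_pdfs; infer_instance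

def pvWitness_merge_pdfs : (List (List (String × String))) × (List (List (String × String))) :=
  ([[("name", "Menu.pdf"), ("url", "u1")], [("name", "guide.pdf")]],
   [[("name", "MENU.PDF"), ("url", "u2")]])

def Spec_merge_pdfs (remote_pdfs : List (List (String × String))) (cached_pdfs : List (List (String × String))) (out : List (List (String × String))) : Prop := out = merge_pdfs_alt remote_pdfs cached_pdfs
instance (remote_pdfs : List (List (String × String))) (cached_pdfs : List (List (String × String))) (out : List (List (String × String))) : Decidable (Spec_merge_pdfs remote_pdfs cached_pdfs out) := by unfold Spec_merge_pdfs; infer_instance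

-- ===== CLAIM (what is proved, stated in full; the proofs are below) =====
def Claim_equal_merge_pdfs : Prop := ∀ (remote_pdfs : List (List (String × String))) (cached_pdfs : List (List (String × String))), Dom_merge_pdfs remote_pdfs cached_pdfs → Pre_merge_pdfs remote_pdfs cached_pdfs → Spec_merge_pdfs remote_pdfs cached_pdfs (merge_pdfs remote_pdfs cached_pdfs)

-- ===== LEMMAS AND PROOFS =====

-- recursion-shaped view of A's loop: keep the first item of each key
def dfirst (l : List (List (String × String))) (s : PySem.Set String) : List (List (String × String)) :=
  match l with
  | [] => []
  | h :: t =>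
    if PySem.Set.contains s (pvKey h) then dfirst t s
    else h :: dfirst t (PySem.Set.add s (pvKey h))

-- recursion-shaped view of B's loop: drop items whose key equals the last kept key
def adjd (l : List (List (String × String))) (lk : Option String) : List (List (String × String)) :=
  match l with
  | [] => []
  | h :: t =>
    if lk = some (pvKey h) then adjd t lk else h :: adjd t (some (pvKey h))

lemma foldlA_eq_dfirst (l : List (List (String × String))) :
    ∀ (acc : List (List (String × String))) (s : PySem.Set String),
    (l.foldl (fun (st : List (List (String × String)) × PySem.Set String) item =>
        if PySem.Set.contains st.2 (pvKey item) then st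
        else (st.1 ++ [item], PySem.Set.add st.2 (pvKey item))) (acc, s)).1
      = acc ++ dfirst l s := by
  induction l with
  | nil => intro acc s; simp [dfirst]
  | cons h t ih =>
    intro acc s
    by_cases hc : pvKey h ∈ s
    · simpa [dfirst, hc, List.foldl_cons] using ih acc s
    · simpa [dfirst, hc, List.foldl_cons, List.append_assoc] using
        ih (acc ++ [h]) (PySem.Set.add s (pvKey h))

lemma foldlB_eq_adjd (l : List (List (String × String))) :
    ∀ (acc : List (List (String × String))),
    (l.foldl (fun merged item =>
        match merged.getLast? with
        | none => merged ++ [item]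
        | some last => if pvKey last = pvKey item then merged else merged ++ [item]) acc)
      = acc ++ adjd l (acc.getLast?.map pvKey) := by
  induction l with
  | nil => intro acc; simp [adjd]
  | cons h t ih =>
    intro acc
    cases hacc : acc.getLast? with
    | none =>
      have hnil : acc = [] := List.getLast?_eq_none_iff.mp hacc
      subst hnil
      simpa [adjd, List.foldl_cons] using ih [h]
    | some last =>
      by_cases hk : pvKey last = pvKey h
      · simp [adjd, List.foldl_cons, hacc, hk, ih]
      · have : (acc ++ [h]).getLast? = some h := by simp
        simp [adjd, List.foldl_cons, hacc, hk, ih, this, List.append_assoc]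

-- membership in A's dedup: x is kept iff its key is unseen and x is the first item of its key
lemma mem_dfirst (l : List (List (String × String))) :
    ∀ (s : PySem.Set String) (x : List (String × String)),
    x ∈ dfirst l s ↔
      pvKey x ∉ s ∧ (l.filter (fun y => decide (pvKey y = pvKey x))).head? = some x := by
  induction l with
  | nil => intro s x; simp [dfirst]
  | cons h t ih =>
    intro s x
    by_cases hc : pvKey h ∈ s
    · have hmem : pvKey h ∈ s := hc
      by_cases hk : pvKey h = pvKey x
      · constructor
        · intro hx
          have := (ih s x).mp (by simpa [dfirst, hc] using hx)
          exact absurd (hk ▸ hmem) this.1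
        · rintro ⟨hns, -⟩
          exact absurd (hk ▸ hmem) hns
      · rw [show dfirst (h :: t) s = dfirst t s by simp [dfirst, hc]]
        rw [ih s x]
        simp [hk]
    · have hmem : pvKey h ∉ s := hc
      rw [show dfirst (h :: t) s = h :: dfirst t (PySem.Set.add s (pvKey h)) by simp [dfirst, hc]]
      by_cases hxh : x = h
      · subst hxh
        simp [hmem]
      · by_cases hk : pvKey h = pvKey x
        · constructor
          · intro hx
            rcases List.mem_cons.mp hx with rfl | hx'
            · exact absurd rfl hxh
            · have := (ih _ x).mp hx'
              have : pvKey x ∉ PySem.Set.add s (pvKey h) := this.1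
              exact absurd ((PySem.Set.mem_add _ _ _).mpr (Or.inr hk.symm)) this
          · rintro ⟨-, hh⟩
            simp [hk] at hh
            exact absurd hh.symm hxh
        · rw [List.mem_cons]
          rw [ih (PySem.Set.add s (pvKey h)) x]
          constructor
          · rintro (rfl | ⟨hna, hhd⟩)
            · exact absurd rfl hxh
            · refine ⟨fun hm => hna ((PySem.Set.mem_add _ _ _).mpr (Or.inl hm)), ?_⟩
              simpa [List.filter_cons, hk] using hhd
          · rintro ⟨hns, hhd⟩
            right
            refine ⟨?_, by simpa [List.filter_cons, hk] using hhd⟩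
            intro hm
            rcases (PySem.Set.mem_add _ _ _).mp hm with hm' | hm'
            · exact hns hm'
            · exact hk (hm'.symm)

-- membership in B's scan over a ≤-sorted list: x is kept iff its key differs from the incoming
-- last key and x is the first item of its key
lemma mem_adjd (l : List (List (String × String))) :
    ∀ (lk : Option String),
    l.Pairwise (fun a b => pvKey a ≤ pvKey b) →
    (∀ k, lk = some k → ∀ y ∈ l, k ≤ pvKey y) →
    ∀ x, (x ∈ adjd l lk ↔
      (∀ k, lk = some k → pvKey x ≠ k) ∧
      (l.filter (fun y => decide (pvKey y = pvKey x))).head? = some x) := by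
  induction l with
  | nil => intro lk _ _ x; simp [adjd]
  | cons h t ih =>
    intro lk hp hlo x
    have hp' : t.Pairwise (fun a b => pvKey a ≤ pvKey b) := hp.of_cons
    have hhle : ∀ y ∈ t, pvKey h ≤ pvKey y := fun y hy => List.rel_of_pairwise_cons hp hy
    by_cases hsk : lk = some (pvKey h)
    · -- skip h
      subst hsk
      rw [show adjd (h :: t) (some (pvKey h)) = adjd t (some (pvKey h)) by simp [adjd]]
      rw [ih (some (pvKey h)) hp' (by rintro k hk y hy; cases hk; exact hhle y hy) x]
      by_cases hk : pvKey h = pvKey x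
      · constructor
        · rintro ⟨hne, -⟩; exact absurd hk.symm (hne _ rfl)
        · rintro ⟨hne, -⟩; exact absurd hk.symm (hne _ rfl)
      · simp [hk]
    · -- keep h
      rw [show adjd (h :: t) lk = h :: adjd t (some (pvKey h)) by simp [adjd, hsk]]
      have hne_h : ∀ k, lk = some k → pvKey h ≠ k := by
        intro k hk heq; exact hsk (by rw [hk, heq])
      by_cases hxh : x = h
      · subst hxh
        constructor
        · intro _; exact ⟨hne_h, by simp⟩
        · intro _; exact List.mem_cons_self
      · rw [List.mem_cons]
        rw [ih (some (pvKey h)) hp' (by rintro k hk y hy; cases hk; exact hhle y hy) x]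
        by_cases hk : pvKey h = pvKey x
        · constructor
          · rintro (rfl | ⟨hne, -⟩)
            · exact absurd rfl hxh
            · exact absurd hk.symm (hne _ rfl)
          · rintro ⟨-, hh⟩
            simp [hk] at hh
            exact absurd hh.symm hxh
        · constructor
          · rintro (rfl | ⟨hne, hhd⟩)
            · exact absurd rfl hxh
            · have hxt : x ∈ t :=
                List.mem_of_mem_filter (List.mem_of_mem_head? hhd)
              refine ⟨?_, by simpa [List.filter_cons, hk] using hhd⟩
              intro k hkk heq
              have hle1 : k ≤ pvKey h := hlo k hkk h List.mem_cons_self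
              have hle2 : pvKey h ≤ pvKey x := hhle x hxt
              have hxk : pvKey x ≤ pvKey h := by rw [heq]; exact hle1
              exact hne (pvKey h) rfl (le_antisymm hxk hle2)
          · rintro ⟨hne, hhd⟩
            right
            have hhd' : (t.filter (fun y => decide (pvKey y = pvKey x))).head? = some x := by
              simpa [List.filter_cons, hk] using hhd
            refine ⟨?_, hhd'⟩
            rintro k ⟨rfl⟩
            exact fun e => hk e.symm

-- keys strictly increase along B's scan of a ≤-sorted list
lemma adjd_lt (l : List (List (String × String))) :
    ∀ (lk : Option String),
    l.Pairwise (fun a b => pvKey a ≤ pvKey b) →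
    (∀ k, lk = some k → ∀ y ∈ l, k ≤ pvKey y) →
    (adjd l lk).Pairwise (fun a b => pvKey a < pvKey b) ∧
    (∀ y ∈ adjd l lk, ∀ k, lk = some k → k < pvKey y) := by
  induction l with
  | nil => intro lk _ _; simp [adjd]
  | cons h t ih =>
    intro lk hp hlo
    have hp' : t.Pairwise (fun a b => pvKey a ≤ pvKey b) := hp.of_cons
    have hhle : ∀ y ∈ t, pvKey h ≤ pvKey y := fun y hy => List.rel_of_pairwise_cons hp hy
    by_cases hsk : lk = some (pvKey h)
    · subst hsk
      rw [show adjd (h :: t) (some (pvKey h)) = adjd t (some (pvKey h)) by simp [adjd]]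
      exact ih (some (pvKey h)) hp' (by rintro k hk y hy; cases hk; exact hhle y hy)
    · rw [show adjd (h :: t) lk = h :: adjd t (some (pvKey h)) by simp [adjd, hsk]]
      obtain ⟨ihp, ihlt⟩ := ih (some (pvKey h)) hp' (by rintro k hk y hy; cases hk; exact hhle y hy)
      have hlt_tail : ∀ y ∈ adjd t (some (pvKey h)), pvKey h < pvKey y :=
        fun y hy => ihlt y hy (pvKey h) rfl
      constructor
      · exact List.pairwise_cons.mpr ⟨hlt_tail, ihp⟩
      · intro y hy k hk
        have hkh : k ≤ pvKey h := hlo k hk h (by simp)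
        have hkne : k ≠ pvKey h := fun heq => hsk (by rw [hk, heq])
        rcases List.mem_cons.mp hy with rfl | hy'
        · exact lt_of_le_of_ne hkh hkne
        · exact lt_of_le_of_lt (hkh) (hlt_tail y hy')

-- ---- stability of PySem's insertion sort with respect to key-filtering ----

lemma filter_insertBy (x : List (String × String)) (k : String) :
    ∀ (ys : List (List (String × String))),
    ys.Pairwise (fun a b => pvKey a ≤ pvKey b) →
    (PySem.List.insertBy (fun a b => decide (pvKey a < pvKey b)) x ys).filter
        (fun y => decide (pvKey y = k))
      = ys.filter (fun y => decide (pvKey y = k)) ++ (if pvKey x = k then [x] else []) := by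
  intro ys
  induction ys with
  | nil =>
    intro _
    by_cases hk : pvKey x = k <;> simp [PySem.List.insertBy, hk]
  | cons y ys ih =>
    intro hp
    have hp' : ys.Pairwise (fun a b => pvKey a ≤ pvKey b) := hp.of_cons
    by_cases hlt : pvKey x < pvKey y
    · rw [show PySem.List.insertBy (fun a b => decide (pvKey a < pvKey b)) x (y :: ys)
            = x :: y :: ys by simp [PySem.List.insertBy, hlt]]
      by_cases hk : pvKey x = k
      · have hnil : (y :: ys).filter (fun y => decide (pvKey y = k)) = [] := by
          rw [List.filter_eq_nil_iff]
          intro z hz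
          have hyz : pvKey y ≤ pvKey z := by
            rcases List.mem_cons.mp hz with rfl | hz'
            · exact le_refl _
            · exact List.rel_of_pairwise_cons hp hz'
          have : pvKey x < pvKey z := lt_of_lt_of_le hlt hyz
          simp only [decide_eq_true_eq]
          intro heq
          exact absurd (heq.trans hk.symm) (ne_of_gt this)
        simp [hk, hnil]
      · simp [List.filter_cons, hk]
    · rw [show PySem.List.insertBy (fun a b => decide (pvKey a < pvKey b)) x (y :: ys)
            = y :: PySem.List.insertBy (fun a b => decide (pvKey a < pvKey b)) x ys by
          simp [PySem.List.insertBy, hlt]]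
      rw [List.filter_cons, List.filter_cons, ih hp']
      by_cases hky : pvKey y = k <;> simp [hky]

lemma insertBy_pairwise (x : List (String × String)) :
    ∀ (ys : List (List (String × String))),
    ys.Pairwise (fun a b => pvKey a ≤ pvKey b) →
    (PySem.List.insertBy (fun a b => decide (pvKey a < pvKey b)) x ys).Pairwise
      (fun a b => pvKey a ≤ pvKey b) := by
  intro ys
  induction ys with
  | nil => intro _; simp [PySem.List.insertBy]
  | cons y ys ih =>
    intro hp
    have hp' : ys.Pairwise (fun a b => pvKey a ≤ pvKey b) := hp.of_cons
    by_cases hlt : pvKey x < pvKey y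
    · rw [show PySem.List.insertBy (fun a b => decide (pvKey a < pvKey b)) x (y :: ys)
            = x :: y :: ys by simp [PySem.List.insertBy, hlt]]
      refine List.pairwise_cons.mpr ⟨?_, hp⟩
      intro z hz
      rcases List.mem_cons.mp hz with rfl | hz'
      · exact le_of_lt hlt
      · exact le_trans (le_of_lt hlt) (List.rel_of_pairwise_cons hp hz')
    · rw [show PySem.List.insertBy (fun a b => decide (pvKey a < pvKey b)) x (y :: ys)
            = y :: PySem.List.insertBy (fun a b => decide (pvKey a < pvKey b)) x ys by
          simp [PySem.List.insertBy, hlt]]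
      refine List.pairwise_cons.mpr ⟨?_, ih hp'⟩
      intro z hz
      rcases (PySem.List.mem_insertBy _ _ _ _).mp hz with rfl | hz'
      · exact le_of_not_gt hlt
      · exact List.rel_of_pairwise_cons hp hz'

lemma stable_foldl (k : String) :
    ∀ (l acc : List (List (String × String))),
    acc.Pairwise (fun a b => pvKey a ≤ pvKey b) →
    ((l.foldl (fun a x => PySem.List.insertBy (fun a b => decide (pvKey a < pvKey b)) x a) acc).filter
        (fun y => decide (pvKey y = k)))
      = acc.filter (fun y => decide (pvKey y = k)) ++ l.filter (fun y => decide (pvKey y = k)) := by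
  intro l
  induction l with
  | nil => intro acc _; simp
  | cons h t ih =>
    intro acc hp
    rw [List.foldl_cons]
    rw [ih _ (insertBy_pairwise h acc hp)]
    rw [filter_insertBy h k acc hp]
    by_cases hk : pvKey h = k <;> simp [hk, List.append_assoc]

-- sorted is stable: filtering one key class commutes with PySem.List.sorted
lemma sorted_filter (l : List (List (String × String))) (k : String) :
    (PySem.List.sorted l pvKey).filter (fun y => decide (pvKey y = k))
      = l.filter (fun y => decide (pvKey y = k)) := by
  rw [PySem.List.sorted_eq_foldl_insertBy]
  simpa using stable_foldl k l [] (by simp)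

-- A's dedup keeps pairwise distinct keys
lemma dfirst_nodup (l : List (List (String × String))) :
    ∀ (s : PySem.Set String),
    (dfirst l s).Pairwise (fun a b => pvKey a ≠ pvKey b) := by
  induction l with
  | nil => intro s; simp [dfirst]
  | cons h t ih =>
    intro s
    by_cases hc : pvKey h ∈ s
    · simpa [dfirst, hc] using ih s
    · rw [show dfirst (h :: t) s = h :: dfirst t (PySem.Set.add s (pvKey h)) by simp [dfirst, hc]]
      refine List.pairwise_cons.mpr ⟨?_, ih _⟩
      intro y hy
      have := (mem_dfirst t _ y).mp hy
      intro heq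
      exact this.1 ((PySem.Set.mem_add _ _ _).mpr (Or.inr heq.symm))

-- ===== VERDICT (by name: the statement is the Claim_ definition above) =====
theorem merge_pdfs_spec : Claim_equal_merge_pdfs := by
  intro r c _hdom _hpre
  unfold Spec_merge_pdfs
  simp only [merge_pdfs, merge_pdfs_alt]
  rw [foldlA_eq_dfirst (r ++ c) [] PySem.Set.empty]
  rw [foldlB_eq_adjd (PySem.List.sorted (r ++ c) pvKey) []]
  simp only [List.nil_append, List.getLast?_nil, Option.map_none]
  set l := r ++ c with hl
  set S := PySem.List.sorted l pvKey with hS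
  have hSp : S.Pairwise (fun a b => pvKey a ≤ pvKey b) := PySem.List.sorted_pairwise l pvKey
  have htriv : ∀ k : String, (none : Option String) = some k → ∀ y ∈ S, k ≤ pvKey y := by
    intro k hk; cases hk
  -- memberships coincide
  have hmem : ∀ x, x ∈ adjd S none ↔ x ∈ dfirst l PySem.Set.empty := by
    intro x
    rw [mem_adjd S none hSp htriv x, mem_dfirst l PySem.Set.empty x]
    rw [hS, sorted_filter l (pvKey x)]
    constructor
    · rintro ⟨-, hh⟩
      exact ⟨(by simp [PySem.Set.empty]), hh⟩
    · rintro ⟨-, hh⟩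
      exact ⟨(fun k hk => nomatch hk), hh⟩
  -- both lists are Nodup
  have hnd1 : (adjd S none).Nodup := by
    have := (adjd_lt S none hSp htriv).1
    exact this.imp (fun {a b} hlt => fun heq => absurd (heq ▸ rfl) (ne_of_lt hlt))
  have hnd2 : (dfirst l PySem.Set.empty).Nodup := by
    have := dfirst_nodup l PySem.Set.empty
    exact this.imp (fun {a b} hne => fun heq => hne (heq ▸ rfl))
  have hperm : (adjd S none).Perm (dfirst l PySem.Set.empty) :=
    (List.perm_ext_iff_of_nodup hnd1 hnd2).mpr hmem
  exact PySem.List.sorted_eq_of_perm_of_pairwise_lt _ _ pvKey hperm (adjd_lt S none hSp htriv).1
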